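-- pv_equiv track=rewrite | github.com/pakeke-constructor/6PM | main.py | find_occurence
-- ===== SOURCE A (Python) =====
-- def find_occurence(s, pos, ch):
--   min_distance = len(s)
--   found_position = -1
--   for i in range(len(s)):
--     if s[i] == ch:
--       distance = abs(pos - i)
--       if distance < min_distance:
--         min_distance = distance
--         found_position = i
--   return found_position
-- ===== SOURCE B (Python) =====
-- def find_occurence(s, pos, ch):
--   n = len(s)
--   for d in range(n):
--     i = pos - d
--     if 0 <= i < n and s[i] == ch:
--       return i
--     j = pos + d
--     if d > 0 and 0 <= j < n and s[j] == ch: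
--       return j
--   return -1
-- ===== Notes on version B (the rewrite author's own statement) =====
-- stated objective: alternative
-- what changed: Replaces A's full left-to-right scan that maintains a running (min_distance, found_position) argmin with an outward search from pos over distances d = 0..len(s)-1, testing index pos-d before pos+d and returning at the first match.
import Mathlib
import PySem

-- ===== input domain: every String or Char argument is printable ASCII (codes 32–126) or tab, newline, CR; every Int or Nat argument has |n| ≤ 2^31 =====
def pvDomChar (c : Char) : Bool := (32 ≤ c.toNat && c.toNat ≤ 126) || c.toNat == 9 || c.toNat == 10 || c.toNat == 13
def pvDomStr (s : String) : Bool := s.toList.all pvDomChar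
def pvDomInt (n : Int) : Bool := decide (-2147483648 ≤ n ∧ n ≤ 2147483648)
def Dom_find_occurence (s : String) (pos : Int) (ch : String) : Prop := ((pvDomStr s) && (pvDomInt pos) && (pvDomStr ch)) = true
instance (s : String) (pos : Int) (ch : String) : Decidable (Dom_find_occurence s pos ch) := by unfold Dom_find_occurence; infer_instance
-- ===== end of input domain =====

-- B replaces A's full left-to-right argmin scan by an outward search from pos over
-- distances d = 0 .. len(s)-1 (index pos-d before pos+d), returning at the first match
-- (objective: alternative decomposition with early exit; same worst-case cost).

-- ===== PORT A =====
-- A's loop body: state (min_distance, found_position); s[i] == ch is a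
-- one-character-string comparison, ported exactly as ch.toList = [s.toList[i]].
def pvStepA (cs chl : List Char) (pos : Int) (st : Int × Int) (i : Nat) : Int × Int :=
  if chl = [cs.getD i ' '] then
    let distance := |pos - (i : Int)|
    if distance < st.1 then (distance, (i : Int)) else st
  else st

def find_occurence (s : String) (pos : Int) (ch : String) : Int :=
  let cs := s.toList
  ((List.range cs.length).foldl (pvStepA cs ch.toList pos) ((cs.length : Int), -1)).2

-- ===== PORT B =====
-- B's loop body for distance d; B's early `return` is modelled by the Option accumulator.
def pvStepB (cs chl : List Char) (pos : Int) (acc : Option Int) (d : Nat) : Option Int :=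
  match acc with
  | some x => some x
  | none =>
    let i := pos - (d : Int)
    if 0 ≤ i ∧ i < (cs.length : Int) ∧ chl = [cs.getD i.toNat ' '] then some i
    else
      let j := pos + (d : Int)
      if 0 < d ∧ 0 ≤ j ∧ j < (cs.length : Int) ∧ chl = [cs.getD j.toNat ' '] then some j
      else none

def find_occurence_alt (s : String) (pos : Int) (ch : String) : Int :=
  let cs := s.toList
  ((List.range cs.length).foldl (pvStepB cs ch.toList pos) none).getD (-1)

-- ===== PRECONDITION & SPEC =====
def Spec_find_occurence (s : String) (pos : Int) (ch : String) (out : Int) : Prop := out = find_occurence_alt s pos ch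
instance (s : String) (pos : Int) (ch : String) (out : Int) : Decidable (Spec_find_occurence s pos ch out) := by unfold Spec_find_occurence; infer_instance

-- ===== CLAIM (what is proved, stated in full; the proofs are below) =====
def Claim_equal_find_occurence : Prop := ∀ (s : String) (pos : Int) (ch : String), Dom_find_occurence s pos ch → Spec_find_occurence s pos ch (find_occurence s pos ch)

-- ===== LEMMAS AND PROOFS =====

-- Branch-computation forms of the two loop bodies (definitional).
theorem pvStepA_eq (cs chl : List Char) (pos : Int) (st : Int × Int) (i : Nat) :
    pvStepA cs chl pos st i =
      if chl = [cs.getD i ' '] then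
        (if |pos - (i : Int)| < st.1 then (|pos - (i : Int)|, (i : Int)) else st)
      else st := rfl

theorem pvStepB_none (cs chl : List Char) (pos : Int) (d : Nat) :
    pvStepB cs chl pos none d =
      if 0 ≤ pos - (d : Int) ∧ pos - (d : Int) < (cs.length : Int) ∧
          chl = [cs.getD (pos - (d : Int)).toNat ' '] then some (pos - (d : Int))
      else if 0 < d ∧ 0 ≤ pos + (d : Int) ∧ pos + (d : Int) < (cs.length : Int) ∧
          chl = [cs.getD (pos + (d : Int)).toNat ' '] then some (pos + (d : Int))
      else none := rfl

-- Invariant of A's fold over the first m indices: either no occurrence at distance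
-- < len(s) was seen (state unchanged), or the state holds the lexicographically
-- (distance, index)-minimal occurrence among the first m indices.
theorem pvA_inv (cs chl : List Char) (pos : Int) (m : Nat) :
    (((List.range m).foldl (pvStepA cs chl pos) ((cs.length : Int), -1)) = ((cs.length : Int), -1)
      ∧ ∀ i, i < m → chl = [cs.getD i ' '] → ¬(|pos - (i : Int)| < (cs.length : Int)))
    ∨ (∃ k, k < m ∧ chl = [cs.getD k ' '] ∧ |pos - (k : Int)| < (cs.length : Int)
      ∧ ((List.range m).foldl (pvStepA cs chl pos) ((cs.length : Int), -1)) = (|pos - (k : Int)|, (k : Int))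
      ∧ ∀ i, i < m → chl = [cs.getD i ' '] →
          (|pos - (k : Int)| < |pos - (i : Int)| ∨ (|pos - (k : Int)| = |pos - (i : Int)| ∧ k ≤ i))) := by
  induction m with
  | zero => exact Or.inl ⟨rfl, by intro i hi; omega⟩
  | succ m ih =>
    rw [List.range_succ, List.foldl_append]
    rcases ih with ⟨hst, hno⟩ | ⟨k, hk, hocc, hlt, hst, hmin⟩
    · rw [hst]
      by_cases ho : chl = [cs.getD m ' ']
      · by_cases hd : |pos - (m : Int)| < (cs.length : Int)
        · refine Or.inr ⟨m, Nat.lt_succ_self m, ho, hd, ?_, ?_⟩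
          · rw [List.foldl_cons, List.foldl_nil, pvStepA_eq, if_pos ho, if_pos hd]
          · intro i hi hoi
            rcases Nat.lt_succ_iff_lt_or_eq.mp hi with h | h
            · exact Or.inl (lt_of_lt_of_le hd (not_lt.mp (hno i h hoi)))
            · exact Or.inr ⟨by rw [h], by omega⟩
        · refine Or.inl ⟨by rw [List.foldl_cons, List.foldl_nil, pvStepA_eq, if_pos ho, if_neg hd], ?_⟩
          intro i hi hoi
          rcases Nat.lt_succ_iff_lt_or_eq.mp hi with h | h
          · exact hno i h hoi
          · rw [h]; exact hd
      · refine Or.inl ⟨by rw [List.foldl_cons, List.foldl_nil, pvStepA_eq, if_neg ho], ?_⟩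
        intro i hi hoi
        rcases Nat.lt_succ_iff_lt_or_eq.mp hi with h | h
        · exact hno i h hoi
        · rw [h] at hoi; exact absurd hoi ho
    · rw [hst]
      by_cases ho : chl = [cs.getD m ' ']
      · by_cases hd : |pos - (m : Int)| < |pos - (k : Int)|
        · refine Or.inr ⟨m, Nat.lt_succ_self m, ho, lt_trans hd hlt, ?_, ?_⟩
          · rw [List.foldl_cons, List.foldl_nil, pvStepA_eq, if_pos ho]; simp only; rw [if_pos hd]
          · intro i hi hoi
            rcases Nat.lt_succ_iff_lt_or_eq.mp hi with h | h
            · rcases hmin i h hoi with h2 | ⟨h2, _⟩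
              · exact Or.inl (lt_trans hd h2)
              · exact Or.inl (h2 ▸ hd)
            · exact Or.inr ⟨by rw [h], by omega⟩
        · refine Or.inr ⟨k, Nat.lt_succ_of_lt hk, hocc, hlt, ?_, ?_⟩
          · rw [List.foldl_cons, List.foldl_nil, pvStepA_eq, if_pos ho]; simp only; rw [if_neg hd]
          · intro i hi hoi
            rcases Nat.lt_succ_iff_lt_or_eq.mp hi with h | h
            · exact hmin i h hoi
            · rcases lt_or_eq_of_le (not_lt.mp hd) with h2 | h2
              · exact Or.inl (h ▸ h2)
              · exact Or.inr ⟨h ▸ h2, h ▸ Nat.le_of_lt hk⟩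
      · refine Or.inr ⟨k, Nat.lt_succ_of_lt hk, hocc, hlt, by rw [List.foldl_cons, List.foldl_nil, pvStepA_eq, if_neg ho], ?_⟩
        intro i hi hoi
        rcases Nat.lt_succ_iff_lt_or_eq.mp hi with h | h
        · exact hmin i h hoi
        · rw [h] at hoi; exact absurd hoi ho

theorem pvB_foldl_some (cs chl : List Char) (pos : Int) (l : List Nat) (x : Int) :
    l.foldl (pvStepB cs chl pos) (some x) = some x := by
  induction l with
  | nil => rfl
  | cons a l ih => rw [List.foldl_cons]; exact ih

theorem pvB_foldl_eq_findSome? (cs chl : List Char) (pos : Int) (l : List Nat) :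
    l.foldl (pvStepB cs chl pos) none = l.findSome? (pvStepB cs chl pos none) := by
  induction l with
  | nil => rfl
  | cons a l ih =>
    rw [List.foldl_cons, List.findSome?_cons]
    cases h : pvStepB cs chl pos none a with
    | none => exact ih
    | some x => exact pvB_foldl_some cs chl pos l x

-- A hit of B at distance d is an occurrence at distance exactly d.
theorem pvB_none_of_no_close (cs chl : List Char) (pos : Int) (d : Nat)
    (h : ∀ i, i < cs.length → chl = [cs.getD i ' '] → ¬(|pos - (i : Int)| ≤ (d : Int))) :
    pvStepB cs chl pos none d = none := by
  rw [pvStepB_none]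
  split_ifs with h1 h2
  · exfalso
    obtain ⟨h0, hn2, hoi⟩ := h1
    have hiv : (((pos - (d : Int)).toNat : Int)) = pos - (d : Int) := Int.toNat_of_nonneg h0
    refine h (pos - (d : Int)).toNat (by omega) hoi ?_
    rw [hiv, sub_sub_cancel, abs_of_nonneg (by positivity)]
  · exfalso
    obtain ⟨hd0, h0, hn2, hoi⟩ := h2
    have hiv : (((pos + (d : Int)).toNat : Int)) = pos + (d : Int) := Int.toNat_of_nonneg h0
    refine h (pos + (d : Int)).toNat (by omega) hoi ?_
    rw [hiv]
    have : pos - (pos + (d : Int)) = -(d : Int) := by ring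
    rw [this, abs_neg, abs_of_nonneg (by positivity)]
  · rfl

-- ===== VERDICT (by name: the statement is the Claim_ definition above) =====
theorem find_occurence_spec : Claim_equal_find_occurence := by
  unfold Claim_equal_find_occurence
  intro s pos ch _
  unfold Spec_find_occurence
  simp only [find_occurence, find_occurence_alt]
  set cs := s.toList with hcs
  set chl := ch.toList with hchl
  rw [pvB_foldl_eq_findSome?]
  rcases pvA_inv cs chl pos cs.length with ⟨hst, hno⟩ | ⟨k, hk, hocc, hlt, hst, hmin⟩
  · rw [hst]
    have hB : (List.range cs.length).findSome? (pvStepB cs chl pos none) = none := by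
      rw [List.findSome?_eq_none_iff]
      intro d hd
      rw [List.mem_range] at hd
      refine pvB_none_of_no_close cs chl pos d ?_
      intro i hi hoi hle
      exact hno i hi hoi (by omega)
    rw [hB]; rfl
  · rw [hst]
    set dstar : Nat := (|pos - (k : Int)|).toNat with hds
    have hdstar : ((dstar : Nat) : Int) = |pos - (k : Int)| := Int.toNat_of_nonneg (abs_nonneg _)
    have hdn : dstar < cs.length := by omega
    have hprefix : ∀ d, d < dstar → pvStepB cs chl pos none d = none := by
      intro d hd
      refine pvB_none_of_no_close cs chl pos d ?_
      intro i hi hoi hle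
      rcases hmin i hi hoi with h2 | ⟨h2, _⟩ <;> omega
    have hhit : pvStepB cs chl pos none dstar = some (k : Int) := by
      by_cases hkp : (k : Int) ≤ pos
      · have habs : |pos - (k : Int)| = pos - (k : Int) := abs_of_nonneg (by omega)
        have hi : pos - (dstar : Int) = (k : Int) := by rw [hdstar, habs]; ring
        have hcond : 0 ≤ pos - (dstar : Int) ∧ pos - (dstar : Int) < (cs.length : Int) ∧
            chl = [cs.getD (pos - (dstar : Int)).toNat ' '] := by
          refine ⟨by omega, by rw [hi]; exact_mod_cast hk, ?_⟩
          rw [hi]; simpa using hocc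
        rw [pvStepB_none, if_pos hcond, hi]
      · replace hkp : pos < (k : Int) := lt_of_not_ge hkp
        have habs : |pos - (k : Int)| = (k : Int) - pos := by
          rw [abs_of_nonpos (by omega)]; ring
        have hj : pos + (dstar : Int) = (k : Int) := by rw [hdstar, habs]; ring
        have hnot : ¬(0 ≤ pos - (dstar : Int) ∧ pos - (dstar : Int) < (cs.length : Int) ∧
            chl = [cs.getD (pos - (dstar : Int)).toNat ' ']) := by
          rintro ⟨h0, hn2, hoi⟩
          have hiv : (((pos - (dstar : Int)).toNat : Int)) = pos - (dstar : Int) :=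
            Int.toNat_of_nonneg h0
          have hdisti : |pos - (((pos - (dstar : Int)).toNat : Int))| = (dstar : Int) := by
            rw [hiv, sub_sub_cancel, abs_of_nonneg (by positivity)]
          rcases hmin (pos - (dstar : Int)).toNat (by omega) hoi with h2 | ⟨h2, h3⟩
          · omega
          · have h3' : ((k : Nat) : Int) ≤ (((pos - (dstar : Int)).toNat : Int)) := by
              exact_mod_cast h3
            omega
        have hcond : 0 < dstar ∧ 0 ≤ pos + (dstar : Int) ∧ pos + (dstar : Int) < (cs.length : Int) ∧
            chl = [cs.getD (pos + (dstar : Int)).toNat ' '] := by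
          refine ⟨by omega, by omega, by rw [hj]; exact_mod_cast hk, ?_⟩
          rw [hj]; simpa using hocc
        rw [pvStepB_none, if_neg hnot, if_pos hcond, hj]
      -- assemble: range n = range dstar ++ [dstar] ++ rest
    have hsplit : cs.length = (dstar + 1) + (cs.length - (dstar + 1)) := by omega
    have hB : (List.range cs.length).findSome? (pvStepB cs chl pos none) = some (k : Int) := by
      rw [hsplit, List.range_add, List.findSome?_append]
      have h1 : (List.range (dstar + 1)).findSome? (pvStepB cs chl pos none) = some (k : Int) := by
        rw [List.range_succ, List.findSome?_append]
        have h0 : (List.range dstar).findSome? (pvStepB cs chl pos none) = none := by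
          rw [List.findSome?_eq_none_iff]
          intro d hd
          rw [List.mem_range] at hd
          exact hprefix d hd
        rw [h0]
        simp [hhit]
      rw [h1]
      rfl
    rw [hB]
    rfl
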